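-- pv_equiv track=rewrite | github.com/Tio-Joca/Teste-Estagio-PWC | main.py | verificador_anagrama_palindromo
-- ===== SOURCE A (Python) =====
-- from collections import Counter
--
-- def verificador_anagrama_palindromo(string):
--     string = string.lower().replace(" ", "")
--     contador = Counter(string)
--
--     count_impares = 0
--
--     for count in contador.values():
--         if count % 2 != 0:
--             count_impares += 1
--
--     if count_impares <= 1:
--         return "A string é um anagrama de um palíndromo."
--     else:
--         return "A string não é um anagrama de um palíndromo."
-- ===== SOURCE B (Python) =====
-- def verificador_anagrama_palindromo(string):
--     string = string.lower().replace(" ", "")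
--     impares = set()
--     for ch in string:
--         if ch in impares:
--             impares.discard(ch)
--         else:
--             impares.add(ch)
--     if len(impares) <= 1:
--         return "A string é um anagrama de um palíndromo."
--     else:
--         return "A string não é um anagrama de um palíndromo."
-- ===== Notes on version B (the rewrite author's own statement) =====
-- stated objective: idiomatic
-- what changed: Replaced Counter plus a second loop over counts by a single pass toggling each character in/out of a parity set; the answer is len(set) <= 1.
import Mathlib
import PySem

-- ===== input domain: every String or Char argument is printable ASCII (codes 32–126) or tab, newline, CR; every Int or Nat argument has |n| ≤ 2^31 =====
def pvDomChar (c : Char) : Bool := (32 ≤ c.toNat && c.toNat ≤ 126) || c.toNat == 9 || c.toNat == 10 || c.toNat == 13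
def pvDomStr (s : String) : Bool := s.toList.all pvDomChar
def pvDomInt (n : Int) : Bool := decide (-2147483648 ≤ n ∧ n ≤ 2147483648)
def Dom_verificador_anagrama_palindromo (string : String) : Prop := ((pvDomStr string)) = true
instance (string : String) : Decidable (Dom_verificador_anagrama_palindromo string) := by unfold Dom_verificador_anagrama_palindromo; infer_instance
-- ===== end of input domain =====

-- B replaces Counter plus a second loop over the counts by one pass toggling each char in/out of a parity set (idiomatic; same cost).

-- ===== PORT A =====
def verificador_anagrama_palindromo (string : String) : String :=
  let s := PySem.Str.replace (PySem.Str.lower string) " " ""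
  let contador := PySem.Dict.counter s.toList
  let count_impares : Int :=
    contador.values.foldl (fun acc count => if count % 2 ≠ 0 then acc + 1 else acc) 0
  if count_impares ≤ 1 then "A string é um anagrama de um palíndromo."
  else "A string não é um anagrama de um palíndromo."

-- ===== PORT B =====
def verificador_anagrama_palindromo_alt (string : String) : String :=
  let s := PySem.Str.replace (PySem.Str.lower string) " " ""
  let impares : PySem.Set Char :=
    s.toList.foldl
      (fun (imp : PySem.Set Char) ch =>
        if PySem.Set.contains imp ch then PySem.Set.discard imp ch else PySem.Set.add imp ch)
      PySem.Set.empty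
  if PySem.Set.len impares ≤ 1 then "A string é um anagrama de um palíndromo."
  else "A string não é um anagrama de um palíndromo."

-- ===== PRECONDITION & SPEC =====
def Spec_verificador_anagrama_palindromo (string : String) (out : String) : Prop := out = verificador_anagrama_palindromo_alt string
instance (string : String) (out : String) : Decidable (Spec_verificador_anagrama_palindromo string out) := by unfold Spec_verificador_anagrama_palindromo; infer_instance

-- ===== CLAIM (what is proved, stated in full; the proofs are below) =====
def Claim_equal_verificador_anagrama_palindromo : Prop := ∀ (string : String), Dom_verificador_anagrama_palindromo string → Spec_verificador_anagrama_palindromo string (verificador_anagrama_palindromo string)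

-- ===== LEMMAS AND PROOFS =====

-- A's counting loop is countP of the odd predicate.
theorem foldl_count_odd (vs : List Int) (acc : Int) :
    vs.foldl (fun a c => if c % 2 ≠ 0 then a + 1 else a) acc
      = acc + (vs.countP (fun c => decide (c % 2 ≠ 0)) : Int) := by
  induction vs generalizing acc with
  | nil => simp
  | cons v t ih =>
    simp only [List.foldl_cons, List.countP_cons, ih]
    by_cases h : v % 2 ≠ 0
    · simp [h]; ring
    · simp [h]

-- B's toggle loop: invariant — nodup, and membership means the count so far is odd (xor the start set).
theorem toggle_invariant (l : List Char) (s : PySem.Set Char) (hnd : s.Nodup) :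
    (l.foldl (fun (imp : PySem.Set Char) ch =>
        if PySem.Set.contains imp ch then PySem.Set.discard imp ch else PySem.Set.add imp ch) s).Nodup
    ∧ ∀ x, x ∈ (l.foldl (fun (imp : PySem.Set Char) ch =>
        if PySem.Set.contains imp ch then PySem.Set.discard imp ch else PySem.Set.add imp ch) s)
        ↔ ((x ∈ s ∧ l.count x % 2 = 0) ∨ (x ∉ s ∧ l.count x % 2 = 1)) := by
  induction l generalizing s with
  | nil => simpa using hnd
  | cons c t ih =>
    simp only [List.foldl_cons]
    by_cases hc : c ∈ s
    · rw [if_pos (by simpa using hc)]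
      obtain ⟨h1, h2⟩ := ih (PySem.Set.discard s c) (PySem.Set.nodup_discard s c hnd)
      refine ⟨h1, fun x => ?_⟩
      rw [h2 x]
      simp only [PySem.Set.mem_discard]
      rcases eq_or_ne x c with rfl | hx
      · simp [hc, List.count_cons_self]
        omega
      · simp [hx, Ne.symm hx]
    · rw [if_neg (by simpa using hc)]
      obtain ⟨h1, h2⟩ := ih (PySem.Set.add s c) (PySem.Set.nodup_add s c hnd)
      refine ⟨h1, fun x => ?_⟩
      rw [h2 x]
      simp only [PySem.Set.mem_add]
      rcases eq_or_ne x c with rfl | hx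
      · simp [hc, List.count_cons_self]
        omega
      · simp [hx, Ne.symm hx]

-- Two nodup lists with the same membership have the same length.
theorem length_eq_of_nodup_of_mem_iff {α : Type} [DecidableEq α] {l₁ l₂ : List α}
    (h₁ : l₁.Nodup) (h₂ : l₂.Nodup) (h : ∀ x, x ∈ l₁ ↔ x ∈ l₂) : l₁.length = l₂.length := by
  rw [← List.toFinset_card_of_nodup h₁, ← List.toFinset_card_of_nodup h₂]
  congr 1
  ext x
  simpa using h x

-- Core: on any character list, A's odd-count tally equals the size of B's toggle set.
theorem core (l : List Char) :
    (PySem.Dict.counter l).values.foldl (fun acc count => if count % 2 ≠ 0 then acc + 1 else acc) 0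
      = ((l.foldl (fun (imp : PySem.Set Char) ch =>
          if PySem.Set.contains imp ch then PySem.Set.discard imp ch else PySem.Set.add imp ch)
          PySem.Set.empty).length : Int) := by
  have hv : (PySem.Dict.counter l).values = (PySem.Set.ofList l).map (fun k => (l.count k : Int)) := by
    simp [PySem.Dict.values, PySem.Dict.items_counter]
  rw [hv, foldl_count_odd, List.countP_map]
  obtain ⟨hnd, hmem⟩ := toggle_invariant l PySem.Set.empty (by simp [PySem.Set.empty])
  have hfilter :
      ((PySem.Set.ofList l).filter (fun k => decide (l.count k % 2 = 1))).length
        = (l.foldl (fun (imp : PySem.Set Char) ch =>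
            if PySem.Set.contains imp ch then PySem.Set.discard imp ch else PySem.Set.add imp ch)
            PySem.Set.empty).length := by
    apply length_eq_of_nodup_of_mem_iff (List.Nodup.filter _ (PySem.Set.nodup_ofList l)) hnd
    intro x
    rw [hmem x]
    simp only [List.mem_filter, PySem.Set.mem_ofList, PySem.Set.empty, List.not_mem_nil,
      false_and, false_or, not_false_eq_true, true_and, decide_eq_true_eq]
    constructor
    · rintro ⟨_, hodd⟩
      exact hodd
    · intro hodd
      have hne : l.count x ≠ 0 := by omega
      exact ⟨List.count_pos_iff.mp (Nat.pos_of_ne_zero hne), hodd⟩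
  have hcp : ((PySem.Set.ofList l).countP
      ((fun c => decide (c % 2 ≠ 0)) ∘ fun k => ((l.count k : Int)))) =
      ((PySem.Set.ofList l).filter (fun k => decide (l.count k % 2 = 1))).length := by
    rw [show ((fun c => decide (c % 2 ≠ 0)) ∘ fun k => ((l.count k : Int)))
          = (fun k => decide (l.count k % 2 = 1)) from
        funext fun k => by simp only [Function.comp_apply, decide_eq_decide]; omega]
    exact List.countP_eq_length_filter
  rw [hcp, hfilter]
  ring

-- ===== VERDICT (by name: the statement is the Claim_ definition above) =====
theorem verificador_anagrama_palindromo_spec : Claim_equal_verificador_anagrama_palindromo := by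
  intro string _
  unfold Spec_verificador_anagrama_palindromo verificador_anagrama_palindromo verificador_anagrama_palindromo_alt
  simp only
  rw [core ((PySem.Str.replace (PySem.Str.lower string) " " "").toList)]
  simp only [PySem.Set.len]
  split_ifs with h1 <;> rfl
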